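-- pv_equiv track=rewrite | github.com/asmeyatsky/athenaforge | src/athenaforge/domain/services/map_cascade_analyser.py | get_co_migration_batches
-- ===== SOURCE A (Python) =====
-- from collections import defaultdict, deque
--
-- def get_co_migration_batches(
--     dependencies: dict[str, list[str]]
-- ) -> list[tuple[str, ...]]:
--     """Return connected components — groups of tables that must migrate together."""
--     # Build undirected adjacency list
--     adjacency: dict[str, set[str]] = defaultdict(set)
--     all_nodes: set[str] = set(dependencies.keys())
--     for parent, children in dependencies.items():
--         all_nodes.update(children)
--         for child in children:
--             adjacency[parent].add(child)
--             adjacency[child].add(parent)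
--
--     visited: set[str] = set()
--     components: list[tuple[str, ...]] = []
--
--     for node in sorted(all_nodes):
--         if node in visited:
--             continue
--         component: list[str] = []
--         queue: deque[str] = deque([node])
--         while queue:
--             current = queue.popleft()
--             if current in visited:
--                 continue
--             visited.add(current)
--             component.append(current)
--             for neighbour in sorted(adjacency[current]):
--                 if neighbour not in visited:
--                     queue.append(neighbour)
--         components.append(tuple(sorted(component)))
--
--     return components
-- ===== SOURCE B (Python) =====
-- def get_co_migration_batches(dependencies):
--     """Connected components via per-component closure saturation: no BFS queue."""
--     nodes = set()
--     for parent, children in dependencies.items():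
--         nodes.add(parent)
--         nodes.update(children)
--
--     def closure(x):
--         comp = {x}
--         while True:
--             new = set(comp)
--             for parent, children in dependencies.items():
--                 if parent in comp:
--                     new.update(children)
--                 if any(c in comp for c in children):
--                     new.add(parent)
--             if len(new) == len(comp):
--                 return comp
--             comp = new
--
--     seen = set()
--     batches = set()
--     for x in nodes:
--         if x in seen:
--             continue
--         comp = closure(x)
--         seen |= comp
--         batches.add(tuple(sorted(comp)))
--     return sorted(batches)
-- ===== Notes on version B (the rewrite author's own statement) =====
-- stated objective: alternative
-- what changed: BFS with an explicit deque and visited set is replaced by whole-set reachability saturation over the edge list (one fixpoint closure per component, skipping nodes already in a found component), with components collected as a set of sorted tuples and sorted once at the end.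
import Mathlib
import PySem

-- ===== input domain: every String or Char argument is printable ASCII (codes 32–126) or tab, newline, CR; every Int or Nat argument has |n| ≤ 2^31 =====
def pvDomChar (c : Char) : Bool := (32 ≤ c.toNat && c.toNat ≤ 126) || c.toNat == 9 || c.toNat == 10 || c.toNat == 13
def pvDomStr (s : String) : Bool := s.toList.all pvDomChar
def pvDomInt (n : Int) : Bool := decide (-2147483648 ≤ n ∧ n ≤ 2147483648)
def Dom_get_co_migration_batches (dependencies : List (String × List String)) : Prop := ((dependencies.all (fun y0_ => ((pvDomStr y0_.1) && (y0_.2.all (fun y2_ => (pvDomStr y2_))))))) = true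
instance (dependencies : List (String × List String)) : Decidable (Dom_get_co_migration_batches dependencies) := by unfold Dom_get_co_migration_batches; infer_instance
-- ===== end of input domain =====

-- B replaces A's BFS (queue + visited set) by a per-node closure saturation over the edge
-- list, deduplicated as a set of sorted components; objective: alternative algorithm.
-- A mutates nothing observable; the equivalence is about the return value.

-- ===== PORT A =====
-- body of the inner 'for child in children' loop (defaultdict: a missing key reads as an empty set)
def aInner (p : String) (adj : PySem.Dict String (PySem.Set String)) (c : String) :
    PySem.Dict String (PySem.Set String) :=
  let adj' := adj.insert p (PySem.Set.add (adj.getD p PySem.Set.empty) c)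
  adj'.insert c (PySem.Set.add (adj'.getD c PySem.Set.empty) p)

-- body of the 'for parent, children in dependencies.items()' loop (state: all_nodes, adjacency)
def aPair (st : PySem.Set String × PySem.Dict String (PySem.Set String))
    (pc : String × List String) : PySem.Set String × PySem.Dict String (PySem.Set String) :=
  (PySem.Set.update st.1 pc.2, pc.2.foldl (aInner pc.1) st.2)

-- the 'while queue' loop; fuel-indexed recursion, the fuel passed by the caller is proven
-- sufficient below (the 0-fuel branch is never reached), so this is the Python loop verbatim
def bfsLoop (adj : PySem.Dict String (PySem.Set String)) :
    Nat → PySem.Set String → List String → List String → PySem.Set String × List String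
  | _, visited, component, [] => (visited, component)
  | 0, visited, component, _ => (visited, component)
  | fuel+1, visited, component, current :: rest =>
    if PySem.Set.contains visited current then
      bfsLoop adj fuel visited component rest
    else
      let visited' := PySem.Set.add visited current
      let component' := component ++ [current]
      let queue' := rest ++ (PySem.List.sorted (adj.getD current PySem.Set.empty) (fun x => x) false).filter
          (fun n => !(PySem.Set.contains visited' n))
      bfsLoop adj fuel visited' component' queue'

-- body of the 'for node in sorted(all_nodes)' loop (state: visited, components)
def aOuter (adj : PySem.Dict String (PySem.Set String)) (fuel : Nat)
    (vc : PySem.Set String × List (List String)) (node : String) :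
    PySem.Set String × List (List String) :=
  if PySem.Set.contains vc.1 node then vc
  else
    let r := bfsLoop adj fuel vc.1 [] [node]
    (r.1, vc.2 ++ [PySem.List.sorted r.2 (fun x => x) false])

def get_co_migration_batches (dependencies : List (String × List String)) : List (List String) :=
  let items := (PySem.Dict.ofList dependencies).items
  let built := items.foldl aPair (PySem.Set.ofList (items.map (fun pr => pr.1)), PySem.Dict.empty)
  let fuel := (built.1.length + 1) * (built.1.length + 1)
  let run := (PySem.List.sorted built.1 (fun x => x) false).foldl (aOuter built.2 fuel)
      (PySem.Set.empty, [])
  run.2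

-- ===== PORT B =====
-- one saturation pass: new = comp plus children of members and parents with a member child
def bStep (items : List (String × List String)) (comp : PySem.Set String) : PySem.Set String :=
  items.foldl (fun new pc =>
      let new := if PySem.Set.contains comp pc.1 then PySem.Set.update new pc.2 else new
      if pc.2.any (fun c => PySem.Set.contains comp c) then PySem.Set.add new pc.1 else new)
    (PySem.Set.ofList comp)

-- the 'while True' loop of closure; fuel proven sufficient below (the set grows strictly
-- until the loop breaks, so |nodes|+1 rounds always reach the break)
def bLoop (items : List (String × List String)) :
    Nat → PySem.Set String → PySem.Set String
  | 0, comp => comp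
  | fuel+1, comp =>
    let new := bStep items comp
    if new.length == comp.length then comp else bLoop items fuel new

-- the 'for x in nodes' loop: one closure per still-unseen node (state: seen, batches)
def bCollectStep (items : List (String × List String)) (fuel : Nat)
    (sb : PySem.Set String × PySem.Set (List String)) (x : String) :
    PySem.Set String × PySem.Set (List String) :=
  if PySem.Set.contains sb.1 x then sb
  else
    let comp := bLoop items fuel (PySem.Set.add PySem.Set.empty x)
    (PySem.Set.union sb.1 comp,
     PySem.Set.add sb.2 (PySem.List.sorted comp (fun y => y) false))

def get_co_migration_batches_alt (dependencies : List (String × List String)) : List (List String) :=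
  let items := (PySem.Dict.ofList dependencies).items
  let nodes := items.foldl
    (fun (s : PySem.Set String) pc => PySem.Set.update (PySem.Set.add s pc.1) pc.2) PySem.Set.empty
  let run := nodes.foldl (bCollectStep items (nodes.length + 1)) (PySem.Set.empty, PySem.Set.empty)
  PySem.List.sorted run.2 (fun t => t) false

-- ===== PRECONDITION & SPEC =====
def Spec_get_co_migration_batches (dependencies : List (String × List String)) (out : List (List String)) : Prop := out = get_co_migration_batches_alt dependencies
instance (dependencies : List (String × List String)) (out : List (List String)) : Decidable (Spec_get_co_migration_batches dependencies out) := by unfold Spec_get_co_migration_batches; infer_instance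

-- ===== CLAIM (what is proved, stated in full; the proofs are below) =====
def Claim_equal_get_co_migration_batches : Prop := ∀ (dependencies : List (String × List String)), Dom_get_co_migration_batches dependencies → Spec_get_co_migration_batches dependencies (get_co_migration_batches dependencies)

-- ===== LEMMAS AND PROOFS =====

-- undirected edge of the dependency list, its reflexive-transitive closure (reachability),
-- and 'is a node of the graph'
def pvEE (its : List (String × List String)) (a b : String) : Prop :=
  ∃ pr ∈ its, (pr.1 = a ∧ b ∈ pr.2) ∨ (pr.1 = b ∧ a ∈ pr.2)

def pvRR (its : List (String × List String)) : String → String → Prop :=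
  Relation.ReflTransGen (pvEE its)

def pvNode (its : List (String × List String)) (x : String) : Prop :=
  ∃ pr ∈ its, pr.1 = x ∨ x ∈ pr.2

theorem pvEE_symm {its : List (String × List String)} {a b : String}
    (h : pvEE its a b) : pvEE its b a := by
  obtain ⟨pr, hpr, h⟩ := h
  exact ⟨pr, hpr, h.symm⟩

theorem pvNode_of_EE_right {its : List (String × List String)} {a b : String}
    (h : pvEE its a b) : pvNode its b := by
  obtain ⟨pr, hpr, h | h⟩ := h
  · exact ⟨pr, hpr, Or.inr h.2⟩
  · exact ⟨pr, hpr, Or.inl h.1⟩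

theorem pvNode_of_RR {its : List (String × List String)} {a b : String}
    (hx : pvNode its a) (h : pvRR its a b) : pvNode its b := by
  induction h with
  | refl => exact hx
  | tail _ h2 ih => exact pvNode_of_EE_right h2

theorem pvRR_symm {its : List (String × List String)} {a b : String}
    (h : pvRR its a b) : pvRR its b a :=
  Relation.ReflTransGen.symmetric (fun _ _ h => pvEE_symm h) h

def pvMu (NL V Q : List String) : Nat :=
  (NL.filter (fun y => !(PySem.Set.contains V y))).length * (NL.length + 1) + Q.length

theorem bfsLoop_cons (adj : PySem.Dict String (PySem.Set String)) (fuel : Nat)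
    (V : PySem.Set String) (comp : List String) (current : String) (rest : List String) :
    bfsLoop adj (fuel+1) V comp (current :: rest) =
      if PySem.Set.contains V current then bfsLoop adj fuel V comp rest
      else bfsLoop adj fuel (PySem.Set.add V current) (comp ++ [current])
        (rest ++ (PySem.List.sorted (adj.getD current PySem.Set.empty) (fun x => x) false).filter
          (fun n => !(PySem.Set.contains (PySem.Set.add V current) n))) := rfl

theorem bfsLoop_nil (adj : PySem.Dict String (PySem.Set String)) (fuel : Nat)
    (V : PySem.Set String) (comp : List String) :
    bfsLoop adj fuel V comp [] = (V, comp) := by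
  cases fuel <;> rfl

theorem pvContainsEq (s : PySem.Set String) (y : String) :
    PySem.Set.contains s y = decide (y ∈ s) := by
  by_cases h : y ∈ s
  · simp [h]
  · cases hc : PySem.Set.contains s y
    · simp [h]
    · exact absurd ((PySem.Set.contains_iff _ _).1 hc) h

theorem pvFilterCount (c : String) (f : String → Bool) :
    ∀ NL : List String, NL.Nodup → c ∈ NL → f c = true →
      (NL.filter (fun y => f y && !(y == c))).length + 1 = (NL.filter f).length := by
  intro NL
  induction NL with
  | nil => simp
  | cons a NL ih =>
    intro hnd hc hfc
    rcases List.mem_cons.1 hc with rfl | hc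
    · have : ∀ y ∈ NL, (f y && !(y == c)) = f y := by
        intro y hy
        have : y ≠ c := fun h => (List.nodup_cons.1 hnd).1 (h ▸ hy)
        simp [this]
      simp [hfc, List.filter_congr this]
    · have hne : ¬ (a = c) := fun h => (List.nodup_cons.1 hnd).1 (h ▸ hc)
      have := ih (List.nodup_cons.1 hnd).2 hc hfc
      by_cases hfa : f a = true <;> simp [hfa, hne] <;> omega

theorem pvBfs (its : List (String × List String)) (adj : PySem.Dict String (PySem.Set String))
    (NL : List String)
    (hadj : ∀ x y, y ∈ adj.getD x PySem.Set.empty ↔ pvEE its x y)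
    (hadjnd : ∀ x, (adj.getD x PySem.Set.empty).Nodup)
    (hNL : ∀ y, y ∈ NL ↔ pvNode its y) (hNLnd : NL.Nodup)
    (x : String) (V0 : PySem.Set String) (hx : pvNode its x)
    (hV0 : ∀ y, pvRR its x y → y ∉ V0) :
    ∀ (fuel : Nat) (V : PySem.Set String) (comp Q : List String),
      (∀ y, y ∈ V ↔ y ∈ V0 ∨ y ∈ comp) →
      (∀ y ∈ comp, pvRR its x y) →
      (∀ y ∈ Q, pvRR its x y) →
      comp.Nodup →
      (∀ u ∈ comp, ∀ v, pvEE its u v → v ∈ V ∨ v ∈ Q) →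
      (x ∈ comp ∨ x ∈ Q) →
      pvMu NL V Q ≤ fuel →
      (∀ y, y ∈ (bfsLoop adj fuel V comp Q).1 ↔ (y ∈ V0 ∨ pvRR its x y)) ∧
      (bfsLoop adj fuel V comp Q).2.Nodup ∧
      (∀ y, y ∈ (bfsLoop adj fuel V comp Q).2 ↔ pvRR its x y) := by
  have final : ∀ (V : PySem.Set String) (comp : List String),
      (∀ y, y ∈ V ↔ y ∈ V0 ∨ y ∈ comp) →
      (∀ y ∈ comp, pvRR its x y) →
      comp.Nodup →
      (∀ u ∈ comp, ∀ v, pvEE its u v → v ∈ V ∨ v ∈ ([] : List String)) →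
      (x ∈ comp ∨ x ∈ ([] : List String)) →
      (∀ y, y ∈ V ↔ (y ∈ V0 ∨ pvRR its x y)) ∧
      comp.Nodup ∧ (∀ y, y ∈ comp ↔ pvRR its x y) := by
    intro V comp h1 h2 h4 h5 h6
    have hxc : x ∈ comp := h6.resolve_right (List.not_mem_nil)
    have hclosed : ∀ u ∈ comp, ∀ v, pvEE its u v → v ∈ comp := by
      intro u hu v huv
      rcases (h1 v).1 ((h5 u hu v huv).resolve_right List.not_mem_nil) with hv0 | hc
      · exact absurd hv0 (hV0 v ((h2 u hu).tail huv))
      · exact hc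
    have hall : ∀ y, pvRR its x y → y ∈ comp := by
      intro y hy
      induction hy with
      | refl => exact hxc
      | tail _ he ih => exact hclosed _ ih _ he
    refine ⟨?_, h4, fun y => ⟨h2 y, hall y⟩⟩
    intro y
    rw [h1]
    exact or_congr Iff.rfl ⟨h2 y, hall y⟩
  intro fuel
  induction fuel with
  | zero =>
    intro V comp Q h1 h2 h3 h4 h5 h6 hmu
    cases Q with
    | nil => rw [bfsLoop_nil]; exact final V comp h1 h2 h4 h5 h6
    | cons c rest => exfalso; simp [pvMu] at hmu
  | succ fuel ih =>
    intro V comp Q h1 h2 h3 h4 h5 h6 hmu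
    cases Q with
    | nil => rw [bfsLoop_nil]; exact final V comp h1 h2 h4 h5 h6
    | cons current rest =>
      by_cases hv : PySem.Set.contains V current = true
      · -- already visited: skip
        rw [bfsLoop_cons, if_pos hv]
        have hcurV : current ∈ V := (PySem.Set.contains_iff _ _).1 hv
        refine ih V comp rest h1 h2 (fun y hy => h3 y (List.mem_cons_of_mem _ hy)) h4 ?_ ?_ ?_
        · intro u hu v huv
          rcases h5 u hu v huv with h | h
          · exact Or.inl h
          · rcases List.mem_cons.1 h with rfl | h
            · exact Or.inl hcurV
            · exact Or.inr h
        · rcases h6 with h | h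
          · exact Or.inl h
          · rcases List.mem_cons.1 h with rfl | h
            · rcases (h1 x).1 hcurV with h0 | hc
              · exact absurd h0 (hV0 x Relation.ReflTransGen.refl)
              · exact Or.inl hc
            · exact Or.inr h
        · simp only [pvMu, List.length_cons] at hmu ⊢; omega
      · -- new node
        have hcurV : current ∉ V := fun h => hv ((PySem.Set.contains_iff _ _).2 h)
        have hcur_rr : pvRR its x current := h3 current List.mem_cons_self
        have hcur_node : pvNode its current := pvNode_of_RR hx hcur_rr
        have hcur_NL : current ∈ NL := (hNL current).2 hcur_node
        rw [bfsLoop_cons, if_neg hv]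
        have hccomp : current ∉ comp := fun h => hcurV ((h1 current).2 (Or.inr h))
        have hsortmem : ∀ v, v ∈ PySem.List.sorted (adj.getD current PySem.Set.empty) (fun x => x) false ↔
            pvEE its current v := by
          intro v; rw [PySem.List.mem_sorted, hadj]
        refine ih _ _ _ ?_ ?_ ?_ ?_ ?_ ?_ ?_
        · intro y
          rw [PySem.Set.mem_add, h1, List.mem_append, List.mem_singleton]
          tauto
        · intro y hy
          rcases List.mem_append.1 hy with h | h
          · exact h2 y h
          · rw [List.mem_singleton] at h; exact h ▸ hcur_rr
        · intro y hy
          rcases List.mem_append.1 hy with h | h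
          · exact h3 y (List.mem_cons_of_mem _ h)
          · have := (hsortmem y).1 (List.mem_of_mem_filter h)
            exact hcur_rr.tail this
        · refine List.Nodup.append h4 (List.nodup_singleton _) ?_
          intro a ha hb
          rw [List.mem_singleton] at hb
          exact hccomp (hb ▸ ha)
        · intro u hu v huv
          rcases List.mem_append.1 hu with hu | hu
          · rcases h5 u hu v huv with h | h
            · exact Or.inl ((PySem.Set.mem_add V current v).2 (Or.inl h))
            · rcases List.mem_cons.1 h with rfl | h
              · exact Or.inl ((PySem.Set.mem_add V v v).2 (Or.inr rfl))
              · exact Or.inr (List.mem_append.2 (Or.inl h))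
          · rw [List.mem_singleton] at hu
            subst hu
            have hvs : v ∈ PySem.List.sorted (adj.getD u PySem.Set.empty) (fun x => x) false :=
              (hsortmem v).2 huv
            by_cases hvV : v ∈ PySem.Set.add V u
            · exact Or.inl hvV
            · refine Or.inr (List.mem_append.2 (Or.inr (List.mem_filter.2 ⟨hvs, ?_⟩)))
              rw [pvContainsEq]
              simp [hvV]
        · rcases h6 with h | h
          · exact Or.inl (List.mem_append.2 (Or.inl h))
          · rcases List.mem_cons.1 h with rfl | h
            · exact Or.inl (List.mem_append.2 (Or.inr (List.mem_singleton.2 rfl)))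
            · exact Or.inr (List.mem_append.2 (Or.inl h))
        · -- fuel accounting
          have hpt : ∀ y ∈ NL, (!(PySem.Set.contains (PySem.Set.add V current) y)) =
              ((!(PySem.Set.contains V y)) && !(y == current)) := by
            intro y _
            rw [pvContainsEq, pvContainsEq]
            by_cases h1' : y ∈ V <;> by_cases h2' : y = current <;>
              simp [h1', h2', PySem.Set.mem_add]
          have hfc : (!(PySem.Set.contains V current)) = true := by
            rw [pvContainsEq]; simp [hcurV]
          have hcount : (NL.filter (fun y => (!(PySem.Set.contains V y)) && !(y == current))).length + 1
              = (NL.filter (fun y => !(PySem.Set.contains V y))).length :=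
            pvFilterCount current (fun y => !(PySem.Set.contains V y)) NL hNLnd hcur_NL hfc
          have hqb : ((PySem.List.sorted (adj.getD current PySem.Set.empty) (fun x => x) false).filter
              (fun n => !(PySem.Set.contains (PySem.Set.add V current) n))).length ≤ NL.length := by
            have h1' : ∀ v ∈ (adj.getD current PySem.Set.empty), v ∈ NL := by
              intro v hv'
              exact (hNL v).2 (pvNode_of_EE_right ((hadj current v).1 hv'))
            have hsub : (adj.getD current PySem.Set.empty).Subperm NL :=
              (hadjnd current).subperm h1'
            calc ((PySem.List.sorted (adj.getD current PySem.Set.empty) (fun x => x) false).filter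
                  (fun n => !(PySem.Set.contains (PySem.Set.add V current) n))).length
                ≤ (PySem.List.sorted (adj.getD current PySem.Set.empty) (fun x => x) false).length :=
                  List.length_filter_le _ _
              _ = (adj.getD current PySem.Set.empty).length := PySem.List.length_sorted _ _ _
              _ ≤ NL.length := hsub.length_le
          simp only [pvMu, List.length_append, List.length_cons] at hmu ⊢
          rw [List.filter_congr hpt]
          rw [← hcount, Nat.succ_mul] at hmu
          omega

theorem pvPairwiseLt {L : List String}
    (h1 : L.Pairwise (· ≤ ·)) (h2 : L.Nodup) : L.Pairwise (· < ·) :=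
  (h1.and h2).imp (fun h => lt_of_le_of_ne h.1 h.2)

theorem pvOuter (its : List (String × List String)) (adj : PySem.Dict String (PySem.Set String))
    (NL : List String) (fuel : Nat)
    (hadj : ∀ x y, y ∈ adj.getD x PySem.Set.empty ↔ pvEE its x y)
    (hadjnd : ∀ x, (adj.getD x PySem.Set.empty).Nodup)
    (hNL : ∀ y, y ∈ NL ↔ pvNode its y) (hNLnd : NL.Nodup)
    (hfuel : fuel = (NL.length + 1) * (NL.length + 1)) :
    ∀ (l : List String) (V : PySem.Set String) (comps : List (List String)),
      l.Pairwise (· < ·) → (∀ y ∈ l, pvNode its y) →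
      (∀ v ∈ V, ∀ y, pvRR its v y → y ∈ V) →
      (∀ z, pvNode its z → z ∈ V ∨ z ∈ l) →
      (∀ y ∈ V, ∃ L ∈ comps, y ∈ L) →
      (∀ L ∈ comps, ∃ z, pvNode its z ∧ (∀ y, y ∈ L ↔ pvRR its z y) ∧ L.Pairwise (· < ·)) →
      (∀ L ∈ comps, ∃ m t, L = m :: t ∧ ∀ y ∈ l, m < y) →
      comps.Pairwise (· < ·) →
      (∀ L ∈ (l.foldl (aOuter adj fuel) (V, comps)).2,
         ∃ z, pvNode its z ∧ (∀ y, y ∈ L ↔ pvRR its z y) ∧ L.Pairwise (· < ·)) ∧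
      (∀ z, pvNode its z → ∃ L ∈ (l.foldl (aOuter adj fuel) (V, comps)).2, z ∈ L) ∧
      (l.foldl (aOuter adj fuel) (V, comps)).2.Pairwise (· < ·) := by
  intro l
  induction l with
  | nil =>
    intro V comps _ _ o1 o3 o4 o5 o6 o7
    refine ⟨o5, ?_, o7⟩
    intro z hz
    exact o4 z ((o3 z hz).resolve_right List.not_mem_nil)
  | cons node l ih =>
    intro V comps hpw hnodes o1 o3 o4 o5 o6 o7
    rw [List.foldl_cons]
    by_cases hv : PySem.Set.contains V node = true
    · have hnodeV : node ∈ V := (PySem.Set.contains_iff _ _).1 hv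
      rw [show aOuter adj fuel (V, comps) node = (V, comps) from by simp [aOuter, hnodeV]]
      refine ih V comps hpw.of_cons (fun y hy => hnodes y (List.mem_cons_of_mem _ hy))
        o1 ?_ o4 o5 ?_ o7
      · intro z hz
        rcases o3 z hz with h | h
        · exact Or.inl h
        · rcases List.mem_cons.1 h with rfl | h
          · exact Or.inl hnodeV
          · exact Or.inr h
      · intro L hL
        obtain ⟨m, t, heq, hlt⟩ := o6 L hL
        exact ⟨m, t, heq, fun y hy => hlt y (List.mem_cons_of_mem _ hy)⟩
    · have hnodeV : node ∉ V := fun h => hv ((PySem.Set.contains_iff _ _).2 h)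
      have hnode : pvNode its node := hnodes node List.mem_cons_self
      have hg2 : ∀ y, pvRR its node y → y ∉ V := by
        intro y hy hyV
        exact hnodeV (o1 y hyV node (pvRR_symm hy))
      have hmu : pvMu NL V [node] ≤ fuel := by
        have h1 : (NL.filter (fun y => !(PySem.Set.contains V y))).length ≤ NL.length :=
          List.length_filter_le _ _
        have h2 : (NL.filter (fun y => !(PySem.Set.contains V y))).length * (NL.length + 1) ≤
            NL.length * (NL.length + 1) := Nat.mul_le_mul_right _ h1
        simp only [pvMu, List.length_singleton, hfuel, Nat.succ_mul]
        omega
      obtain ⟨hr1, hr2nd, hr2⟩ := pvBfs its adj NL hadj hadjnd hNL hNLnd node V hnode hg2 fuel V [] [node]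
        (fun y => by simp) (by simp)
        (by intro y hy; rw [List.mem_singleton] at hy; exact hy ▸ Relation.ReflTransGen.refl)
        List.nodup_nil (by simp) (by simp) hmu
      rw [show aOuter adj fuel (V, comps) node =
          ((bfsLoop adj fuel V [] [node]).1,
            comps ++ [PySem.List.sorted (bfsLoop adj fuel V [] [node]).2 (fun x => x) false]) from
        by simp [aOuter, hnodeV]]
      set r := bfsLoop adj fuel V [] [node] with hr
      set K := PySem.List.sorted r.2 (fun x => x) false with hK
      have memK : ∀ y, y ∈ K ↔ pvRR its node y := by
        intro y; rw [hK, PySem.List.mem_sorted]; exact hr2 y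
      have ndK : K.Nodup := (PySem.List.sorted_perm r.2 (fun x => x) false).nodup_iff.2 hr2nd
      have pwK : K.Pairwise (· < ·) :=
        pvPairwiseLt (PySem.List.sorted_pairwise r.2 (fun x => x)) ndK
      have hle : ∀ y ∈ K, node ≤ y := by
        intro y hy
        have hry := (memK y).1 hy
        have hyn : pvNode its y := pvNode_of_RR hnode hry
        rcases o3 y hyn with h | h
        · exact absurd h (hg2 y hry)
        · rcases List.mem_cons.1 h with rfl | h
          · exact le_refl _
          · exact le_of_lt (List.rel_of_pairwise_cons hpw h)
      have hnodeK : node ∈ K := (memK node).2 Relation.ReflTransGen.refl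
      obtain ⟨m, t, hKeq⟩ : ∃ m t, K = m :: t := by
        cases hKe : K with
        | nil => rw [hKe] at hnodeK; exact absurd hnodeK (List.not_mem_nil)
        | cons m t => exact ⟨m, t, rfl⟩
      have hmnode : m = node := by
        have h1 : node ≤ m := hle m (hKeq ▸ List.mem_cons_self)
        rcases List.mem_cons.1 (hKeq ▸ hnodeK) with h | h
        · exact h.symm
        · have := List.rel_of_pairwise_cons (hKeq ▸ pwK) h
          exact absurd this (not_lt.2 h1)
      rw [hmnode] at hKeq
      refine ih r.1 (comps ++ [K]) hpw.of_cons (fun y hy => hnodes y (List.mem_cons_of_mem _ hy))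
        ?_ ?_ ?_ ?_ ?_ ?_
      · -- closed
        intro v hv' y hvy
        rcases (hr1 v).1 hv' with h | h
        · exact (hr1 y).2 (Or.inl (o1 v h y hvy))
        · exact (hr1 y).2 (Or.inr (Relation.ReflTransGen.trans h hvy))
      · intro z hz
        rcases o3 z hz with h | h
        · exact Or.inl ((hr1 z).2 (Or.inl h))
        · rcases List.mem_cons.1 h with rfl | h
          · exact Or.inl ((hr1 z).2 (Or.inr Relation.ReflTransGen.refl))
          · exact Or.inr h
      · intro y hy
        rcases (hr1 y).1 hy with h | h
        · obtain ⟨L, hL, hyL⟩ := o4 y h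
          exact ⟨L, List.mem_append.2 (Or.inl hL), hyL⟩
        · exact ⟨K, List.mem_append.2 (Or.inr (List.mem_singleton.2 rfl)), (memK y).2 h⟩
      · intro L hL
        rcases List.mem_append.1 hL with h | h
        · exact o5 L h
        · rw [List.mem_singleton] at h
          exact h ▸ ⟨node, hnode, memK, pwK⟩
      · intro L hL
        rcases List.mem_append.1 hL with h | h
        · obtain ⟨m', t', heq, hlt⟩ := o6 L h
          exact ⟨m', t', heq, fun y hy => hlt y (List.mem_cons_of_mem _ hy)⟩
        · rw [List.mem_singleton] at h
          subst h
          exact ⟨node, t, hKeq, fun y hy => List.rel_of_pairwise_cons hpw hy⟩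
      · rw [List.pairwise_append]
        refine ⟨o7, List.pairwise_singleton _ _, ?_⟩
        intro L hL K' hK'
        rw [List.mem_singleton] at hK'
        subst hK'
        obtain ⟨m', t', heq, hlt⟩ := o6 L hL
        rw [heq, hKeq]
        exact List.Lex.rel (hlt node List.mem_cons_self)

theorem pvAInnerGetD (p c : String) (adj : PySem.Dict String (PySem.Set String)) (z w : String) :
    w ∈ (aInner p adj c).getD z PySem.Set.empty ↔
      w ∈ adj.getD z PySem.Set.empty ∨ (z = p ∧ w = c) ∨ (w = p ∧ z = c) := by
  by_cases h1 : z = c <;> by_cases h2 : z = p <;> by_cases h3 : c = p <;>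
    simp_all [aInner, PySem.Dict.getD_insert, PySem.Set.mem_add]

theorem pvAInnerNodup (p c : String) (adj : PySem.Dict String (PySem.Set String))
    (h : ∀ x, (adj.getD x PySem.Set.empty).Nodup) :
    ∀ z, ((aInner p adj c).getD z PySem.Set.empty).Nodup := by
  intro z
  simp only [aInner, PySem.Dict.getD_insert]
  split_ifs <;>
    first
      | exact PySem.Set.nodup_add _ _ (PySem.Set.nodup_add _ _ (h _))
      | exact PySem.Set.nodup_add _ _ (h _)
      | exact h _

theorem pvSortedUnique {L1 L2 : List String}
    (h1 : L1.Pairwise (· < ·)) (h2 : L2.Pairwise (· < ·))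
    (hm : ∀ y, y ∈ L1 ↔ y ∈ L2) : L1 = L2 := by
  have n1 : L1.Nodup := h1.imp (fun h => ne_of_lt h)
  have n2 : L2.Nodup := h2.imp (fun h => ne_of_lt h)
  refine List.Perm.eq_of_pairwise ?_ h1 h2 ((List.perm_ext_iff_of_nodup n1 n2).2 hm)
  intro a b _ _ hab hba
  exact absurd hab (lt_asymm hba)

theorem pvBStepFold (comp : PySem.Set String) (l : List (String × List String))
    (new : PySem.Set String) (y : String) :
    y ∈ l.foldl (fun new pc =>
      let new := if PySem.Set.contains comp pc.1 then PySem.Set.update new pc.2 else new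
      if pc.2.any (fun c => PySem.Set.contains comp c) then PySem.Set.add new pc.1 else new) new ↔
      y ∈ new ∨ ∃ pr ∈ l, (pr.1 ∈ comp ∧ y ∈ pr.2) ∨ (pr.1 = y ∧ ∃ c ∈ pr.2, c ∈ comp) := by
  induction l generalizing new with
  | nil => simp
  | cons pc l ih =>
    simp only [List.foldl_cons, ih, List.mem_cons]
    have hstep : y ∈ (let n2 := if PySem.Set.contains comp pc.1 then PySem.Set.update new pc.2 else new
        ; if pc.2.any (fun c => PySem.Set.contains comp c) then PySem.Set.add n2 pc.1 else n2) ↔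
        y ∈ new ∨ (pc.1 ∈ comp ∧ y ∈ pc.2) ∨ (pc.1 = y ∧ ∃ c ∈ pc.2, c ∈ comp) := by
      simp only []
      split_ifs with ha hb hb <;>
        simp only [List.any_eq_true, PySem.Set.contains_iff] at ha hb <;>
        (try simp only [PySem.Set.mem_add, PySem.Set.mem_update]) <;>
        aesop
    rw [hstep]
    aesop

theorem pvBStepMem (its : List (String × List String)) (comp : PySem.Set String) (y : String) :
    y ∈ bStep its comp ↔ y ∈ comp ∨ ∃ u ∈ comp, pvEE its u y := by
  rw [bStep, pvBStepFold, PySem.Set.mem_ofList]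
  constructor
  · rintro (h | ⟨pr, hpr, ⟨h1, h2⟩ | ⟨h1, c, hc1, hc2⟩⟩)
    · exact Or.inl h
    · exact Or.inr ⟨pr.1, h1, pr, hpr, Or.inl ⟨rfl, h2⟩⟩
    · exact Or.inr ⟨c, hc2, pr, hpr, Or.inr ⟨h1, hc1⟩⟩
  · rintro (h | ⟨u, hu, pr, hpr, ⟨h1, h2⟩ | ⟨h1, h2⟩⟩)
    · exact Or.inl h
    · exact Or.inr ⟨pr, hpr, Or.inl ⟨h1.symm ▸ hu, h2⟩⟩
    · exact Or.inr ⟨pr, hpr, Or.inr ⟨h1, ⟨u, h2, hu⟩⟩⟩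

theorem pvBStepNodup (its : List (String × List String)) (comp : PySem.Set String) :
    (bStep its comp).Nodup := by
  rw [bStep]
  generalize hinit : PySem.Set.ofList comp = s
  have hs : s.Nodup := hinit ▸ PySem.Set.nodup_ofList comp
  clear hinit
  induction its generalizing s with
  | nil => exact hs
  | cons pc l ih =>
    refine ih _ ?_
    simp only []
    split_ifs <;> first
      | exact PySem.Set.nodup_add _ _ (PySem.Set.nodup_update _ _ hs)
      | exact PySem.Set.nodup_update _ _ hs
      | exact PySem.Set.nodup_add _ _ hs
      | exact hs

theorem pvBStepSub (its : List (String × List String)) (comp : PySem.Set String) :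
    ∀ y ∈ comp, y ∈ bStep its comp := by
  intro y hy; rw [pvBStepMem]; exact Or.inl hy

theorem pvBLoop (its : List (String × List String)) (NL : List String)
    (hNL : ∀ y, y ∈ NL ↔ pvNode its y) :
    ∀ (fuel : Nat) (comp : PySem.Set String),
      comp.Nodup → (∀ y ∈ comp, pvNode its y) →
      NL.length + 1 ≤ fuel + comp.length →
      (∀ y ∈ comp, y ∈ bLoop its fuel comp) ∧
      (∀ y ∈ bLoop its fuel comp, ∃ u ∈ comp, pvRR its u y) ∧
      (∀ u ∈ bLoop its fuel comp, ∀ v, pvEE its u v → v ∈ bLoop its fuel comp) ∧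
      (bLoop its fuel comp).Nodup := by
  intro fuel
  induction fuel with
  | zero =>
    intro comp hnd hnode hlen
    exfalso
    have hsub : comp ⊆ NL := fun y hy => (hNL y).2 (hnode y hy)
    have := (hnd.subperm hsub).length_le
    omega
  | succ fuel ih =>
    intro comp hnd hnode hlen
    have hmono := pvBStepSub its comp
    have hstnd := pvBStepNodup its comp
    have hsp : comp.Subperm (bStep its comp) := hnd.subperm hmono
    by_cases hq : (bStep its comp).length = comp.length
    · -- break: comp is a fixpoint up to membership
      have hperm : comp.Perm (bStep its comp) := hsp.perm_of_length_le (le_of_eq hq)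
      have hfix : ∀ y, y ∈ bStep its comp → y ∈ comp := fun y hy => hperm.mem_iff.2 hy
      have hres : bLoop its (fuel+1) comp = comp := by
        simp [bLoop, hq]
      rw [hres]
      refine ⟨fun y hy => hy, fun y hy => ⟨y, hy, Relation.ReflTransGen.refl⟩, ?_, hnd⟩
      intro u hu v huv
      exact hfix v ((pvBStepMem its comp v).2 (Or.inr ⟨u, hu, huv⟩))
    · have hres : bLoop its (fuel+1) comp = bLoop its fuel (bStep its comp) := by
        simp [bLoop, hq]
      have hgrow : comp.length < (bStep its comp).length :=
        lt_of_le_of_ne hsp.length_le (fun h => hq h.symm)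
      have hnodes : ∀ y ∈ bStep its comp, pvNode its y := by
        intro y hy
        rcases (pvBStepMem its comp y).1 hy with h | ⟨u, _, he⟩
        · exact hnode y h
        · exact pvNode_of_EE_right he
      have ⟨c1, c2, c3, c4⟩ := ih (bStep its comp) hstnd hnodes (by omega)
      rw [hres]
      refine ⟨fun y hy => c1 y (hmono y hy), ?_, c3, c4⟩
      intro y hy
      obtain ⟨u, hu, hr⟩ := c2 y hy
      rcases (pvBStepMem its comp u).1 hu with h | ⟨w, hw, he⟩
      · exact ⟨u, h, hr⟩
      · exact ⟨w, hw, Relation.ReflTransGen.trans (Relation.ReflTransGen.single he) hr⟩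


-- the DecidableLT instance the ports' sorted-on-lists calls use agrees with the LinearOrder one
theorem pvInstEqL : (fun (a b : List String) => a.decidableLT b : DecidableLT (List String)) =
    (LinearOrder.toDecidableLT : DecidableLT (List String)) := by
  funext a b; exact Subsingleton.elim _ _

-- ---------- A-side: the (all_nodes, adjacency) pair ----------

theorem pvBuiltFst (l : List (String × List String)) (s : PySem.Set String)
    (d : PySem.Dict String (PySem.Set String)) :
    (l.foldl aPair (s, d)).1 = l.foldl (fun s pc => PySem.Set.update s pc.2) s := by
  induction l generalizing s d with
  | nil => rfl
  | cons pc l ih => simpa [aPair] using ih _ _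

theorem pvBuiltSnd (l : List (String × List String)) (s : PySem.Set String)
    (d : PySem.Dict String (PySem.Set String)) :
    (l.foldl aPair (s, d)).2 = l.foldl (fun d pc => pc.2.foldl (aInner pc.1) d) d := by
  induction l generalizing s d with
  | nil => rfl
  | cons pc l ih => simpa [aPair] using ih _ _

theorem pvMemNodesFold (l : List (String × List String)) (s : PySem.Set String) (y : String) :
    y ∈ l.foldl (fun s pc => PySem.Set.update s pc.2) s ↔ y ∈ s ∨ ∃ pr ∈ l, y ∈ pr.2 := by
  induction l generalizing s with
  | nil => simp
  | cons pc l ih =>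
    rw [List.foldl_cons, ih]
    simp only [PySem.Set.mem_update, List.mem_cons]
    aesop

theorem pvNodupNodesFold (l : List (String × List String)) (s : PySem.Set String)
    (hs : s.Nodup) : (l.foldl (fun s pc => PySem.Set.update s pc.2) s).Nodup := by
  induction l generalizing s with
  | nil => exact hs
  | cons pc l ih => exact ih _ (PySem.Set.nodup_update _ _ hs)

theorem pvInnerGetD (p : String) (cs : List String)
    (adj : PySem.Dict String (PySem.Set String)) (x y : String) :
    y ∈ (cs.foldl (aInner p) adj).getD x PySem.Set.empty ↔
      y ∈ adj.getD x PySem.Set.empty ∨ (x = p ∧ y ∈ cs) ∨ (y = p ∧ x ∈ cs) := by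
  induction cs generalizing adj with
  | nil => simp
  | cons c cs ih =>
    rw [List.foldl_cons, ih, pvAInnerGetD]
    simp only [List.mem_cons]
    tauto

theorem pvInnerNodup (p : String) (cs : List String)
    (adj : PySem.Dict String (PySem.Set String))
    (h : ∀ x, (adj.getD x PySem.Set.empty).Nodup) :
    ∀ x, ((cs.foldl (aInner p) adj).getD x PySem.Set.empty).Nodup := by
  induction cs generalizing adj with
  | nil => exact h
  | cons c cs ih => exact ih _ (pvAInnerNodup p c adj h)

theorem pvAdjGetD (l : List (String × List String))
    (adj : PySem.Dict String (PySem.Set String)) (x y : String) :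
    y ∈ (l.foldl (fun d pc => pc.2.foldl (aInner pc.1) d) adj).getD x PySem.Set.empty ↔
      y ∈ adj.getD x PySem.Set.empty ∨ pvEE l x y := by
  induction l generalizing adj with
  | nil => simp [pvEE]
  | cons pc l ih =>
    rw [List.foldl_cons, ih, pvInnerGetD]
    simp only [pvEE, List.mem_cons]
    constructor
    · rintro ((h | ⟨h1, h2⟩ | ⟨h1, h2⟩) | ⟨pr, hpr, h⟩)
      · exact Or.inl h
      · exact Or.inr ⟨pc, Or.inl rfl, Or.inl ⟨h1.symm, h2⟩⟩
      · exact Or.inr ⟨pc, Or.inl rfl, Or.inr ⟨h1.symm, h2⟩⟩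
      · exact Or.inr ⟨pr, Or.inr hpr, h⟩
    · rintro (h | ⟨pr, (rfl | hpr), h | h⟩)
      · exact Or.inl (Or.inl h)
      · exact Or.inl (Or.inr (Or.inl ⟨h.1.symm, h.2⟩))
      · exact Or.inl (Or.inr (Or.inr ⟨h.1.symm, h.2⟩))
      · exact Or.inr ⟨pr, hpr, Or.inl h⟩
      · exact Or.inr ⟨pr, hpr, Or.inr h⟩

theorem pvAdjNodup (l : List (String × List String))
    (adj : PySem.Dict String (PySem.Set String))
    (h : ∀ x, (adj.getD x PySem.Set.empty).Nodup) :
    ∀ x, ((l.foldl (fun d pc => pc.2.foldl (aInner pc.1) d) adj).getD x PySem.Set.empty).Nodup := by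
  induction l generalizing adj with
  | nil => exact h
  | cons pc l ih => exact ih _ (pvInnerNodup _ _ _ h)

-- ---------- B-side: the nodes set ----------

theorem pvMemNodesFoldB (l : List (String × List String)) (s : PySem.Set String) (y : String) :
    y ∈ l.foldl (fun s pc => PySem.Set.update (PySem.Set.add s pc.1) pc.2) s ↔
      y ∈ s ∨ ∃ pr ∈ l, pr.1 = y ∨ y ∈ pr.2 := by
  induction l generalizing s with
  | nil => simp
  | cons pc l ih =>
    rw [List.foldl_cons, ih]
    simp only [PySem.Set.mem_update, PySem.Set.mem_add, List.mem_cons]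
    aesop

theorem pvCollect (its : List (String × List String)) (nodesB : PySem.Set String)
    (hNB : ∀ y, y ∈ nodesB ↔ pvNode its y) (fuel : Nat) (hfuel : nodesB.length ≤ fuel) :
    ∀ (l : List String) (seen : PySem.Set String) (ba : PySem.Set (List String)),
      (∀ y ∈ l, pvNode its y) →
      (∀ v ∈ seen, ∀ y, pvRR its v y → y ∈ seen) →
      (∀ y ∈ seen, ∃ L ∈ ba, y ∈ L) →
      (∀ L ∈ ba, ∃ z, pvNode its z ∧ (∀ y, y ∈ L ↔ pvRR its z y) ∧ L.Pairwise (· < ·)) →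
      ba.Nodup →
      (∀ z, pvNode its z → z ∈ seen ∨ z ∈ l) →
      (∀ L ∈ (l.foldl (bCollectStep its fuel) (seen, ba)).2,
         ∃ z, pvNode its z ∧ (∀ y, y ∈ L ↔ pvRR its z y) ∧ L.Pairwise (· < ·)) ∧
      (∀ z, pvNode its z → ∃ L ∈ (l.foldl (bCollectStep its fuel) (seen, ba)).2, z ∈ L) ∧
      (l.foldl (bCollectStep its fuel) (seen, ba)).2.Nodup := by
  intro l
  induction l with
  | nil =>
    intro seen ba _ i1 i2 i3 i4 i5
    exact ⟨i3, fun z hz => i2 z ((i5 z hz).resolve_right (List.not_mem_nil)), i4⟩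
  | cons x l ih =>
    intro seen ba hl i1 i2 i3 i4 i5
    rw [List.foldl_cons]
    by_cases hx : PySem.Set.contains seen x = true
    · have hxseen : x ∈ seen := (PySem.Set.contains_iff _ _).1 hx
      rw [show bCollectStep its fuel (seen, ba) x = (seen, ba) from by simp [bCollectStep, hxseen]]
      refine ih seen ba (fun y hy => hl y (List.mem_cons_of_mem _ hy)) i1 i2 i3 i4 ?_
      intro z hz
      rcases i5 z hz with h | h
      · exact Or.inl h
      · rcases List.mem_cons.1 h with rfl | h
        · exact Or.inl hxseen
        · exact Or.inr h
    · have hxseen : x ∉ seen := fun h => hx ((PySem.Set.contains_iff _ _).2 h)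
      have hxn : pvNode its x := hl x List.mem_cons_self
      have hcomp : ∀ y ∈ PySem.Set.add PySem.Set.empty x, y = x := by
        intro y hy
        rcases (PySem.Set.mem_add _ _ _).1 hy with h | h
        · exact absurd h (List.not_mem_nil)
        · exact h
      have hxmem : x ∈ PySem.Set.add PySem.Set.empty x :=
        (PySem.Set.mem_add _ _ _).2 (Or.inr rfl)
      obtain ⟨b1, b2, b3, b4⟩ := pvBLoop its nodesB hNB fuel (PySem.Set.add PySem.Set.empty x)
        (PySem.Set.nodup_add _ _ List.nodup_nil)
        (fun y hy => (hcomp y hy) ▸ hxn)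
        (by have : (PySem.Set.add PySem.Set.empty x).length = 1 := rfl; omega)
      have hmemC : ∀ y, y ∈ bLoop its fuel (PySem.Set.add PySem.Set.empty x) ↔ pvRR its x y := by
        intro y
        constructor
        · intro hy
          obtain ⟨u, hu, hr⟩ := b2 y hy
          exact (hcomp u hu) ▸ hr
        · intro hy
          induction hy with
          | refl => exact b1 x hxmem
          | tail _ h2 ih' => exact b3 _ ih' _ h2
      have memK : ∀ y, y ∈ PySem.List.sorted (bLoop its fuel (PySem.Set.add PySem.Set.empty x))
          (fun y => y) false ↔ pvRR its x y := by
        intro y; rw [PySem.List.mem_sorted]; exact hmemC y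
      have pwK : (PySem.List.sorted (bLoop its fuel (PySem.Set.add PySem.Set.empty x))
          (fun y => y) false).Pairwise (· < ·) :=
        pvPairwiseLt (PySem.List.sorted_pairwise _ _)
          ((PySem.List.sorted_perm _ _ _).nodup_iff.2 b4)
      rw [show bCollectStep its fuel (seen, ba) x =
          (PySem.Set.union seen (bLoop its fuel (PySem.Set.add PySem.Set.empty x)),
           PySem.Set.add ba (PySem.List.sorted (bLoop its fuel (PySem.Set.add PySem.Set.empty x))
             (fun y => y) false)) from by simp [bCollectStep, hxseen]]
      refine ih _ _ (fun y hy => hl y (List.mem_cons_of_mem _ hy)) ?_ ?_ ?_ ?_ ?_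
      · intro v hv y hvy
        rcases (PySem.Set.mem_union _ _ _).1 hv with h | h
        · exact (PySem.Set.mem_union _ _ _).2 (Or.inl (i1 v h y hvy))
        · exact (PySem.Set.mem_union _ _ _).2
            (Or.inr ((hmemC y).2 (((hmemC v).1 h).trans hvy)))
      · intro y hy
        rcases (PySem.Set.mem_union _ _ _).1 hy with h | h
        · obtain ⟨L, hL, hyL⟩ := i2 y h
          exact ⟨L, (PySem.Set.mem_add _ _ _).2 (Or.inl hL), hyL⟩
        · exact ⟨_, (PySem.Set.mem_add _ _ _).2 (Or.inr rfl), (memK y).2 ((hmemC y).1 h)⟩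
      · intro L hL
        rcases (PySem.Set.mem_add _ _ _).1 hL with h | h
        · exact i3 L h
        · exact h ▸ ⟨x, hxn, memK, pwK⟩
      · exact PySem.Set.nodup_add _ _ i4
      · intro z hz
        rcases i5 z hz with h | h
        · exact Or.inl ((PySem.Set.mem_union _ _ _).2 (Or.inl h))
        · rcases List.mem_cons.1 h with rfl | h
          · exact Or.inl ((PySem.Set.mem_union _ _ _).2
              (Or.inr ((hmemC z).2 Relation.ReflTransGen.refl)))
          · exact Or.inr h


-- ===== VERDICT (by name: the statement is the Claim_ definition above) =====

theorem get_co_migration_batches_spec : Claim_equal_get_co_migration_batches := by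
  unfold Claim_equal_get_co_migration_batches
  intro deps _
  unfold Spec_get_co_migration_batches
  simp only [get_co_migration_batches, get_co_migration_batches_alt]
  generalize (PySem.Dict.ofList deps).items = its
  -- A side: characterize all_nodes and adjacency
  have hN : ∀ y, y ∈ (its.foldl aPair
      (PySem.Set.ofList (its.map (fun pr => pr.1)), PySem.Dict.empty)).1 ↔ pvNode its y := by
    intro y
    rw [pvBuiltFst, pvMemNodesFold]
    simp only [PySem.Set.mem_ofList, List.mem_map, pvNode]
    aesop
  have hNnd : (its.foldl aPair
      (PySem.Set.ofList (its.map (fun pr => pr.1)), PySem.Dict.empty)).1.Nodup := by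
    rw [pvBuiltFst]
    exact pvNodupNodesFold _ _ (PySem.Set.nodup_ofList _)
  have hAdj : ∀ x y, y ∈ (its.foldl aPair
      (PySem.Set.ofList (its.map (fun pr => pr.1)), PySem.Dict.empty)).2.getD x PySem.Set.empty ↔
      pvEE its x y := by
    intro x y
    rw [pvBuiltSnd, pvAdjGetD]
    simp [PySem.Dict.getD_empty, PySem.Set.empty]
  have hAdjnd : ∀ x, ((its.foldl aPair
      (PySem.Set.ofList (its.map (fun pr => pr.1)), PySem.Dict.empty)).2.getD x PySem.Set.empty).Nodup := by
    rw [pvBuiltSnd]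
    refine pvAdjNodup _ _ ?_
    intro x
    simp [PySem.Dict.getD_empty, PySem.Set.empty]
  -- the sorted node list
  have hNL : ∀ y, y ∈ PySem.List.sorted (its.foldl aPair
      (PySem.Set.ofList (its.map (fun pr => pr.1)), PySem.Dict.empty)).1 (fun x => x) false ↔
      pvNode its y := by
    intro y; rw [PySem.List.mem_sorted]; exact hN y
  have hNLnd : (PySem.List.sorted (its.foldl aPair
      (PySem.Set.ofList (its.map (fun pr => pr.1)), PySem.Dict.empty)).1 (fun x => x) false).Nodup :=
    (PySem.List.sorted_perm _ _ _).nodup_iff.2 hNnd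
  have hNLpw : (PySem.List.sorted (its.foldl aPair
      (PySem.Set.ofList (its.map (fun pr => pr.1)), PySem.Dict.empty)).1 (fun x => x) false).Pairwise (· < ·) :=
    pvPairwiseLt (PySem.List.sorted_pairwise _ _) hNLnd
  obtain ⟨c1, c2, c3⟩ := pvOuter its _ _ _ hAdj hAdjnd hNL hNLnd
    (by rw [PySem.List.length_sorted])
    (PySem.List.sorted (its.foldl aPair
      (PySem.Set.ofList (its.map (fun pr => pr.1)), PySem.Dict.empty)).1 (fun x => x) false)
    PySem.Set.empty [] hNLpw (fun y hy => (hNL y).1 hy)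
    (by intro v hv; exact absurd hv (List.not_mem_nil))
    (by intro z hz; exact Or.inr ((hNL z).2 hz))
    (by intro y hy; exact absurd hy (List.not_mem_nil))
    (by intro L hL; exact absurd hL (List.not_mem_nil))
    (by intro L hL; exact absurd hL (List.not_mem_nil))
    List.Pairwise.nil
  -- B side: characterize nodes and the closure lists
  have hNB : ∀ y, y ∈ its.foldl
      (fun (s : PySem.Set String) pc => PySem.Set.update (PySem.Set.add s pc.1) pc.2)
      PySem.Set.empty ↔ pvNode its y := by
    intro y
    rw [pvMemNodesFoldB]
    simp only [pvNode, PySem.Set.empty]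
    simp
  have ⟨d1, d2, d3⟩ := pvCollect its _ hNB
    ((its.foldl (fun (s : PySem.Set String) pc => PySem.Set.update (PySem.Set.add s pc.1) pc.2)
      PySem.Set.empty).length + 1)
    (by omega)
    (its.foldl (fun (s : PySem.Set String) pc => PySem.Set.update (PySem.Set.add s pc.1) pc.2)
      PySem.Set.empty)
    PySem.Set.empty PySem.Set.empty
    (fun y hy => (hNB y).1 hy)
    (by intro v hv; exact absurd hv (List.not_mem_nil))
    (by intro y hy; exact absurd hy (List.not_mem_nil))
    (by intro L hL; exact absurd hL (List.not_mem_nil))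
    List.nodup_nil
    (fun z hz => Or.inr ((hNB z).2 hz))
  have hAnd : (((PySem.List.sorted (its.foldl aPair
      (PySem.Set.ofList (its.map (fun pr => pr.1)), PySem.Dict.empty)).1 (fun x => x) false).foldl
      (aOuter (its.foldl aPair
        (PySem.Set.ofList (its.map (fun pr => pr.1)), PySem.Dict.empty)).2
        (((its.foldl aPair (PySem.Set.ofList (its.map (fun pr => pr.1)), PySem.Dict.empty)).1.length + 1) *
         ((its.foldl aPair (PySem.Set.ofList (its.map (fun pr => pr.1)), PySem.Dict.empty)).1.length + 1)))
      (PySem.Set.empty, [])).2).Nodup := c3.imp (fun h => ne_of_lt h)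
  rw [show (fun (a b : List String) => a.decidableLT b : DecidableLT (List String)) = _ from pvInstEqL]
  refine (PySem.List.sorted_eq_of_perm_of_pairwise_lt _ _ _ ?_ c3).symm
  refine (List.perm_ext_iff_of_nodup hAnd d3).2 ?_
  intro L
  constructor
  · intro hL
    obtain ⟨z, hz, hm, hpw⟩ := c1 L hL
    obtain ⟨L', hL', hzL'⟩ := d2 z hz
    obtain ⟨z', _, hm', hpw'⟩ := d1 L' hL'
    have hzz : pvRR its z' z := (hm' z).1 hzL'
    have : L' = L := by
      refine pvSortedUnique hpw' hpw ?_
      intro y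
      rw [hm' y, hm y]
      exact ⟨fun h => (pvRR_symm hzz).trans h, fun h => hzz.trans h⟩
    exact this ▸ hL'
  · intro hL
    obtain ⟨z, hz, hm, hpw⟩ := d1 L hL
    obtain ⟨L', hL', hzL'⟩ := c2 z hz
    obtain ⟨z', _, hm', hpw'⟩ := c1 L' hL'
    have hzz : pvRR its z' z := (hm' z).1 hzL'
    have : L' = L := by
      refine pvSortedUnique hpw' hpw ?_
      intro y
      rw [hm' y, hm y]
      exact ⟨fun h => (pvRR_symm hzz).trans h, fun h => hzz.trans h⟩
    exact this ▸ hL'
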